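-- pv_equiv track=rewrite | github.com/JavierCorralLizarraga/SortingAlgorithms | sortingAlgorithms(but in python)/Practica1.py | copia
-- ===== SOURCE A (Python) =====
-- def copia(Samples):
--     """
--     Parameters
--     ----------
--     Samples : Lista
--         de arreglos a ordenar
--
--         Usaremos esta funcion para que todos
--         puedan ordenar los mismo arreglo
--
--
--     Returns:
--
--     -------
--     Regresa 5 copias de Samples, una para cada método
--     Es decir, cinco listas con arreglos de distintos
--     tamaños
--
--     """
--     samples_selection =[]
--     samples_insertion =[]
--     samples_quick = []
--     samples_merge = []
--     samples_bubble =[]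
--     for i in range(len(Samples)):
--         samples_selection.append(Samples[i].copy())
--         samples_insertion.append(Samples[i].copy())
--         samples_quick.append(Samples[i].copy())
--         samples_merge.append(Samples[i].copy())
--         samples_bubble.append(Samples[i].copy())
--     result = [samples_selection,samples_insertion,samples_quick,samples_merge,
--               samples_bubble]
--
--     return result
-- ===== SOURCE B (Python) =====
-- def copia(Samples):
--     # Recursive decomposition: peel off the head element and prepend one fresh
--     # copy of it to each of the five lists produced for the tail.
--     if not Samples:
--         return [[], [], [], [], []]
--     head, rest = Samples[0], Samples[1:]
--     return [[head.copy()] + r for r in copia(rest)]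
-- ===== Notes on version B (the rewrite author's own statement) =====
-- stated objective: alternative
-- what changed: Replaces A's single index loop that appends each element's copy to five named accumulator lists with a structural recursion on Samples that builds the five lists back-to-front, prepending a fresh copy of the head to each list returned for the tail.
import Mathlib
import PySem

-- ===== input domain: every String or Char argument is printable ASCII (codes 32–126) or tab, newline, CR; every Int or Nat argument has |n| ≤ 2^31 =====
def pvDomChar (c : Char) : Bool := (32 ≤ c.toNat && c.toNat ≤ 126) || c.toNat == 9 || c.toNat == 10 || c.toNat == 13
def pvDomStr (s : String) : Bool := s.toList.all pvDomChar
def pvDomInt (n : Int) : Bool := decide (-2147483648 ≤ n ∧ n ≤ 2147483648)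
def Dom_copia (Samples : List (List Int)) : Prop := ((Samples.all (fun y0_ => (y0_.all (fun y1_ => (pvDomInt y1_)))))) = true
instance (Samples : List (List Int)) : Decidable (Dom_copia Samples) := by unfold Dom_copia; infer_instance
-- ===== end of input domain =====

-- B replaces A's single index loop appending to five named accumulators by a structural
-- recursion on Samples that prepends a copy of the head to each of the tail's five lists;
-- objective: alternative decomposition.

-- ===== PORT A =====
-- one iteration of A's loop body: append Samples[i].copy() to each of the five accumulators
def copiaStep (Samples : List (List Int))
    (acc : List (List Int) × List (List Int) × List (List Int) × List (List Int) × List (List Int))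
    (i : Nat) :
    List (List Int) × List (List Int) × List (List Int) × List (List Int) × List (List Int) :=
  (acc.1 ++ [Samples.getD i []],
   acc.2.1 ++ [Samples.getD i []],
   acc.2.2.1 ++ [Samples.getD i []],
   acc.2.2.2.1 ++ [Samples.getD i []],
   acc.2.2.2.2 ++ [Samples.getD i []])

def copia (Samples : List (List Int)) : List (List (List Int)) :=
  let st := (List.range Samples.length).foldl (copiaStep Samples) ([], [], [], [], [])
  [st.1, st.2.1, st.2.2.1, st.2.2.2.1, st.2.2.2.2]

-- ===== PORT B =====
def copia_alt (Samples : List (List Int)) : List (List (List Int)) :=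
  match Samples with
  | [] => [[], [], [], [], []]
  | head :: rest => (copia_alt rest).map (fun r => head :: r)

-- ===== PRECONDITION & SPEC =====
def Spec_copia (Samples : List (List Int)) (out : List (List (List Int))) : Prop := out = copia_alt Samples
instance (Samples : List (List Int)) (out : List (List (List Int))) : Decidable (Spec_copia Samples out) := by unfold Spec_copia; infer_instance

-- ===== CLAIM =====
def Claim_equal_copia : Prop := ∀ (Samples : List (List Int)), Dom_copia Samples → Spec_copia Samples (copia Samples)

-- ===== LEMMAS AND PROOFS =====
theorem copia_fold (Samples : List (List Int)) :
    ∀ n, n ≤ Samples.length →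
      (List.range n).foldl (copiaStep Samples) ([], [], [], [], []) =
        (Samples.take n, Samples.take n, Samples.take n, Samples.take n, Samples.take n) := by
  intro n
  induction n with
  | zero => intro _; simp
  | succ n ih =>
      intro h
      have hn : n < Samples.length := Nat.lt_of_succ_le h
      rw [List.range_succ, List.foldl_append, ih (Nat.le_of_lt hn)]
      have hget : Samples.getD n [] = Samples[n] := List.getD_eq_getElem Samples [] hn
      have htake : Samples.take (n+1) = Samples.take n ++ [Samples.getD n []] := by
        rw [List.take_succ_eq_append_getElem hn, hget]
      rw [List.foldl_cons, List.foldl_nil, htake]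
      rfl

theorem copia_alt_eq (Samples : List (List Int)) :
    copia_alt Samples = [Samples, Samples, Samples, Samples, Samples] := by
  induction Samples with
  | nil => rfl
  | cons h t ih => simp [copia_alt, ih]

-- ===== VERDICT =====
theorem copia_spec : Claim_equal_copia := by
  intro Samples _
  unfold Spec_copia copia
  rw [copia_fold Samples Samples.length (le_refl _), copia_alt_eq]
  simp
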